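-- pv_equiv track=rewrite | github.com/Brubzick/feature-extraction-from-asm | graph_analysis_disasm.py | calTransferIns
-- ===== SOURCE A (Python) =====
-- def calTransferIns(bl, arch):
--     if arch == 'x86':
--         calls = {'jmp': 1, 'jz': 1, 'jnz': 1, 'js': 1, 'je': 1, 'jne': 1, 'jg': 1, 'jle': 1, 'jge': 1, 'ja': 1, 'jnc': 1,
--                 'call': 1}
--     elif arch == 'arm':
--         calls = {'mvn': 1, "mov": 1}
--     else:
--         calls = {'beq': 1, 'bne': 1, 'bgtz': 1, "bltz": 1, "bgez": 1, "blez": 1, 'j': 1, 'jal': 1, 'jr': 1, 'jalr': 1}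
--
--     invoke_num = 0
--     for ins in bl:
--         ins = ins.split()
--         if ins[0] in calls:
--             invoke_num += 1
--
--     return invoke_num
-- ===== SOURCE B (Python) =====
-- def calTransferIns(bl, arch):
--     if arch == 'x86':
--         calls = ('jmp', 'jz', 'jnz', 'js', 'je', 'jne', 'jg', 'jle', 'jge', 'ja', 'jnc', 'call')
--     elif arch == 'arm':
--         calls = ('mvn', 'mov')
--     else:
--         calls = ('beq', 'bne', 'bgtz', 'bltz', 'bgez', 'blez', 'j', 'jal', 'jr', 'jalr')
--
--     counts = {}
--     for ins in bl:
--         op = ins.split()[0]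
--         counts[op] = counts.get(op, 0) + 1
--
--     return sum(counts.get(op, 0) for op in calls)
-- ===== Notes on version B (the rewrite author's own statement) =====
-- stated objective: alternative
-- what changed: B builds a frequency table (dict) of each instruction's first token in one pass and then sums the table entries over the arch's transfer-opcode set, replacing A's per-instruction membership test and running counter.
import Mathlib
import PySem

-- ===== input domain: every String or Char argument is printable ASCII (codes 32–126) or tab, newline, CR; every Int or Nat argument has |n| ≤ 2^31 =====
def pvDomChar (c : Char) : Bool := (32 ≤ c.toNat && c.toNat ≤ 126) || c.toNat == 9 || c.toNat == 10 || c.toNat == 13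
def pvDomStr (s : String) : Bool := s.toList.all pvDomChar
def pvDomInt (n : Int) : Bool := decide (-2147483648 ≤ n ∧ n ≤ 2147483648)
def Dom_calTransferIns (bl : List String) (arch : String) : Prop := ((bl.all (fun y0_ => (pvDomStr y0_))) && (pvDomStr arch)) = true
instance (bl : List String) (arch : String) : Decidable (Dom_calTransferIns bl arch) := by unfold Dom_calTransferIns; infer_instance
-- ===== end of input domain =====

-- B builds a frequency table of first tokens in one pass and then sums the table's entries
-- over the transfer-opcode set, instead of A's per-instruction membership test (objective: alternative).


-- ===== PORT A =====
def calTransferIns (bl : List String) (arch : String) : Int :=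
  let calls : PySem.Dict String Int :=
    if arch = "x86" then
      PySem.Dict.ofList [("jmp", 1), ("jz", 1), ("jnz", 1), ("js", 1), ("je", 1), ("jne", 1),
        ("jg", 1), ("jle", 1), ("jge", 1), ("ja", 1), ("jnc", 1), ("call", 1)]
    else if arch = "arm" then
      PySem.Dict.ofList [("mvn", 1), ("mov", 1)]
    else
      PySem.Dict.ofList [("beq", 1), ("bne", 1), ("bgtz", 1), ("bltz", 1), ("bgez", 1),
        ("blez", 1), ("j", 1), ("jal", 1), ("jr", 1), ("jalr", 1)]
  -- ins.split()[0]: pyGet? is none exactly where Python raises IndexError; Pre_ excludes that.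
  bl.foldl (fun invoke_num ins =>
    if calls.contains ((PySem.List.pyGet? (PySem.Str.split₀ ins) 0).getD "") then invoke_num + 1
    else invoke_num) 0

-- ===== PORT B =====
def calTransferIns_alt (bl : List String) (arch : String) : Int :=
  let calls : List String :=
    if arch = "x86" then
      ["jmp", "jz", "jnz", "js", "je", "jne", "jg", "jle", "jge", "ja", "jnc", "call"]
    else if arch = "arm" then ["mvn", "mov"]
    else ["beq", "bne", "bgtz", "bltz", "bgez", "blez", "j", "jal", "jr", "jalr"]
  -- counts[op] = counts.get(op, 0) + 1 over the first token of each instruction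
  let counts : PySem.Dict String Int :=
    bl.foldl (fun d ins =>
      let op := (PySem.List.pyGet? (PySem.Str.split₀ ins) 0).getD ""
      d.insert op (d.getD op 0 + 1)) PySem.Dict.empty
  (calls.map (fun op => counts.getD op 0)).sum

-- ===== PRECONDITION & SPEC =====
-- Pre_ excludes instructions that are empty or whitespace-only: there ins.split()[0] raises
-- IndexError in both A and B.
def Pre_calTransferIns (bl : List String) (arch : String) : Prop :=
  ∀ ins ∈ bl, PySem.Str.split₀ ins ≠ []
instance (bl : List String) (arch : String) : Decidable (Pre_calTransferIns bl arch) := by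
  unfold Pre_calTransferIns; infer_instance
def pvWitness_calTransferIns : List String × String := (["jmp eax", "mov r0, r1", "add ax, bx"], "x86")

def Spec_calTransferIns (bl : List String) (arch : String) (out : Int) : Prop := out = calTransferIns_alt bl arch
instance (bl : List String) (arch : String) (out : Int) : Decidable (Spec_calTransferIns bl arch out) := by unfold Spec_calTransferIns; infer_instance

-- ===== CLAIM (what is proved, stated in full; the proofs are below) =====
def Claim_equal_calTransferIns : Prop := ∀ (bl : List String) (arch : String), Dom_calTransferIns bl arch → Pre_calTransferIns bl arch → Spec_calTransferIns bl arch (calTransferIns bl arch)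

-- ===== LEMMAS AND PROOFS =====

-- countP over a cons'd membership predicate splits off the head's count when it is fresh.
theorem countP_mem_cons (a : String) (ops toks : List String) (ha : a ∉ ops) :
    toks.countP (fun t => decide (t = a ∨ t ∈ ops)) =
      toks.count a + toks.countP (fun t => decide (t ∈ ops)) := by
  induction toks with
  | nil => simp
  | cons t toks ih =>
    rw [List.countP_cons, List.countP_cons, List.count_cons, ih]
    by_cases h : t = a
    · subst h; simp [ha]; omega
    · simp [h]; omega

-- summing per-opcode counts over a duplicate-free opcode list counts the tokens in the list
theorem sum_counts_eq_countP (ops toks : List String) (h : ops.Nodup) :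
    (ops.map (fun op => toks.count op)).sum = toks.countP (fun t => decide (t ∈ ops)) := by
  induction ops with
  | nil => simp
  | cons a ops ih =>
    rcases List.nodup_cons.mp h with ⟨ha, hnd⟩
    simp only [List.map_cons, List.sum_cons, ih hnd, List.mem_cons]
    exact (countP_mem_cons a ops toks ha).symm

-- the common core: A's membership loop equals B's table-then-sum, for any key list and dict
-- whose keys are exactly that (duplicate-free) list
theorem core_eq (bl : List String) (d : PySem.Dict String Int) (ops : List String)
    (hk : d.keys = ops) (hnd : ops.Nodup) :
    bl.foldl (fun invoke_num ins =>
        if d.contains ((PySem.List.pyGet? (PySem.Str.split₀ ins) 0).getD "") then invoke_num + 1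
        else invoke_num) (0 : Int) =
      (ops.map (fun op =>
        (bl.foldl (fun d ins =>
          d.insert ((PySem.List.pyGet? (PySem.Str.split₀ ins) 0).getD "")
            (d.getD ((PySem.List.pyGet? (PySem.Str.split₀ ins) 0).getD "") 0 + 1))
          PySem.Dict.empty).getD op 0)).sum := by
  have htok :
      bl.foldl (fun d ins =>
          d.insert ((PySem.List.pyGet? (PySem.Str.split₀ ins) 0).getD "")
            (d.getD ((PySem.List.pyGet? (PySem.Str.split₀ ins) 0).getD "") 0 + 1))
          PySem.Dict.empty
        = PySem.Dict.counter (bl.map (fun ins => (PySem.List.pyGet? (PySem.Str.split₀ ins) 0).getD "")) := by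
    rw [← PySem.Dict.foldl_insert_getD_add_one_eq_counter, List.foldl_map]
  rw [htok]
  have hA : bl.foldl (fun invoke_num ins =>
        if d.contains ((PySem.List.pyGet? (PySem.Str.split₀ ins) 0).getD "") then invoke_num + 1
        else invoke_num) (0 : Int)
      = (bl.map (fun ins => (PySem.List.pyGet? (PySem.Str.split₀ ins) 0).getD "")).foldl
          (fun invoke_num t => if d.contains t then invoke_num + 1 else invoke_num) (0 : Int) := by
    rw [List.foldl_map]
  rw [hA, PySem.List.foldl_count_if]
  simp only [PySem.Dict.getD_counter]
  have hcast : ∀ (l : List String),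
      (l.map (fun op =>
        ((List.count op (bl.map (fun ins => (PySem.List.pyGet? (PySem.Str.split₀ ins) 0).getD "")) : Nat) : Int))).sum
      = ((l.map (fun op =>
        List.count op (bl.map (fun ins => (PySem.List.pyGet? (PySem.Str.split₀ ins) 0).getD "")))).sum : Int) := by
    intro l
    induction l with
    | nil => simp
    | cons a l ih => simp [ih]
  rw [hcast, sum_counts_eq_countP _ _ hnd, zero_add]
  congr 1
  apply List.countP_congr
  intro t _
  rw [PySem.Dict.contains_eq_decide_mem_keys, hk]

-- ===== VERDICT (by name: the statement is the Claim_ definition above) =====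
theorem calTransferIns_spec : Claim_equal_calTransferIns := by
  intro bl arch _ _
  unfold Spec_calTransferIns calTransferIns calTransferIns_alt
  by_cases h86 : arch = "x86"
  · subst h86
    rw [if_pos rfl, if_pos rfl]
    exact core_eq bl _ _ (by decide) (by decide)
  · by_cases harm : arch = "arm"
    · subst harm
      rw [if_neg (show ("arm" : String) ≠ "x86" by decide), if_pos rfl,
          if_neg (show ("arm" : String) ≠ "x86" by decide), if_pos rfl]
      exact core_eq bl _ _ (by decide) (by decide)
    · rw [if_neg h86, if_neg harm, if_neg h86, if_neg harm]
      exact core_eq bl _ _ (by decide) (by decide)
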